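-- pv_equiv track=rewrite | github.com/PardhuKadali/INNOMATICS_BATCH_225 | leetcodes.py | lc_1470
-- ===== SOURCE A (Python) =====
-- def lc_1470(nums:list[int], n):
--
--     '''
--     Given the array nums consisting of 2n elements in the form [x1,x2,...,xn,y1,y2,...,yn].
--     Return the array in the form [x1,y1,x2,y2,...,xn,yn].
--     Example 1:
--     Input: nums = [2,5,1,3,4,7], n = 3
--     Output: [2,3,5,4,1,7]
--     Explanation: Since x1=2, x2=5, x3=1, y1=3, y2=4, y3=7 then the answer is [2,3,5,4,1,7].
--       ----------------------------------------------- Swetha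
--     '''
--
--     x=nums[0:n]
--     y=nums[n:]
--     new_arr=[]
--     for i in range(n):
--         new_arr.append(x[i])
--         new_arr.append(y[i])
--     return new_arr
-- ===== SOURCE B (Python) =====
-- def lc_1470(nums, n):
--     # Strided slice assignment: x-values to even slots, y-values to odd slots.
--     res = [None] * (2 * n)
--     res[0::2] = nums[:n]
--     res[1::2] = nums[n:2*n]
--     return res
-- ===== Notes on version B (the rewrite author's own statement) =====
-- stated objective: idiomatic
-- what changed: Replaces the index-and-append loop with a preallocated result of length 2n filled by two strided slice assignments (res[0::2] = nums[:n], res[1::2] = nums[n:2*n]).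
-- outside the precondition, e.g. on lc_1470([1, 2, 3], -1): A returns [], B raises ValueError
import Mathlib
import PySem

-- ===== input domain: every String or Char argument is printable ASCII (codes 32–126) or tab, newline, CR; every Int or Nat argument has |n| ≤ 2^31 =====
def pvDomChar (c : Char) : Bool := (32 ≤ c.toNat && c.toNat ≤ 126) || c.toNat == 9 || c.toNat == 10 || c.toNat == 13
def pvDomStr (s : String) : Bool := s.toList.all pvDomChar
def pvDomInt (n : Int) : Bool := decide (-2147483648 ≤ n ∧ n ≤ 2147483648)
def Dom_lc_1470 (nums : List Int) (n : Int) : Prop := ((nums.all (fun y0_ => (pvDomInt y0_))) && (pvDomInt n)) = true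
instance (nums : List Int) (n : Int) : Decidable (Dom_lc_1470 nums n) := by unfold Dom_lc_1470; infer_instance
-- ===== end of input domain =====

-- B preallocates a result of length 2n and fills it with two strided slice assignments instead of A's append loop (return value only).

-- ===== PORT A =====
def lc_1470 (nums : List Int) (n : Int) : List Int :=
  let x := PySem.List.slice nums (some 0) (some n)
  let y := PySem.List.slice nums (some n) none
  (PySem.List.pyRange 0 n 1).foldl
    (fun acc i => (acc ++ [PySem.List.pyGetD x i 0]) ++ [PySem.List.pyGetD y i 0]) []

-- ===== PORT B =====
-- res[i::2] = vals, written element by element at i, i+2, … (exact for len(vals) slots available, which Pre_ guarantees)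
def writeStride2 (res : List Int) (i : Nat) (vals : List Int) : List Int :=
  match vals with
  | [] => res
  | v :: vs => writeStride2 (res.set i v) (i + 2) vs

-- [None]*(2*n) is modelled as replicate with 0: inside Pre_ every slot is overwritten before the list is returned
def lc_1470_alt (nums : List Int) (n : Int) : List Int :=
  writeStride2
    (writeStride2 (List.replicate (2 * n).toNat 0) 0 (PySem.List.slice nums none (some n)))
    1 (PySem.List.slice nums (some n) (some (2 * n)))

-- ===== PRECONDITION & SPEC =====
-- Pre_ excludes inputs where A raises IndexError (0 < n with fewer than 2*n elements), and the negative-n inputs with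
-- more than -n elements, where A returns [] but B's slice assignment itself raises ValueError (length mismatch).
def Pre_lc_1470 (nums : List Int) (n : Int) : Prop :=
  (0 ≤ n ∧ 2 * n ≤ (nums.length : Int)) ∨ (n < 0 ∧ (nums.length : Int) ≤ -n)
instance (nums : List Int) (n : Int) : Decidable (Pre_lc_1470 nums n) := by unfold Pre_lc_1470; infer_instance
def pvWitness_lc_1470 : List Int × Int := ([2, 5, 1, 3, 4, 7], 3)

def Spec_lc_1470 (nums : List Int) (n : Int) (out : List Int) : Prop := out = lc_1470_alt nums n
instance (nums : List Int) (n : Int) (out : List Int) : Decidable (Spec_lc_1470 nums n out) := by unfold Spec_lc_1470; infer_instance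

-- ===== CLAIM (what is proved, stated in full; the proofs are below) =====
def Claim_equal_lc_1470 : Prop := ∀ (nums : List Int) (n : Int), Dom_lc_1470 nums n → Pre_lc_1470 nums n → Spec_lc_1470 nums n (lc_1470 nums n)

-- ===== LEMMAS AND PROOFS =====

-- Python's nums[n:2*n] is empty when n ≤ 0 (both bounds clamp to the same point).
lemma slice_mid_nil (xs : List Int) (n : Int) (h : n ≤ 0) :
    PySem.List.slice xs (some n) (some (2*n)) = [] := by
  simp only [PySem.List.slice, PySem.List.clampIdx]
  split_ifs <;> simp <;> omega

-- Python's nums[:n] is empty when n < 0 and the list has at most -n elements.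
lemma slice_to_nil (xs : List Int) (n : Int) (h : (xs.length : Int) ≤ -n) :
    PySem.List.slice xs none (some n) = [] := by
  simp only [PySem.List.slice, PySem.List.clampIdx]
  split_ifs <;> simp <;> omega

-- A's interleaving loop over indices 0..m-1 equals zip-and-flatten of the two prefixes of length m.
lemma interleave_key (m : Nat) (x y : List Int) (hx : m ≤ x.length) (hy : m ≤ y.length) :
    (PySem.List.pyRange 0 (m : Int) 1).foldl
      (fun acc i => (acc ++ [PySem.List.pyGetD x i 0]) ++ [PySem.List.pyGetD y i 0]) []
    = ((x.take m).zip (y.take m)).flatMap (fun p => [p.1, p.2]) := by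
  induction m with
  | zero => simp [PySem.List.pyRange_one_eq_nil]
  | succ k ih =>
    have hk : ((k + 1 : Nat) : Int) = (k : Int) + 1 := by push_cast; ring
    rw [hk, PySem.List.pyRange_one_succ_right (by positivity), List.foldl_append]
    simp only [List.foldl_cons, List.foldl_nil]
    rw [ih (by omega) (by omega)]
    rw [List.take_add_one, List.take_add_one,
        List.getElem?_eq_getElem (by omega), List.getElem?_eq_getElem (by omega),
        List.zip_append (by simp; omega)]
    simp [PySem.List.pyGetD_natCast, List.getD_eq_getElem?_getD,
          List.getElem?_eq_getElem (show k < x.length by omega),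
          List.getElem?_eq_getElem (show k < y.length by omega)]

-- writing at indices i+1, i+3, … leaves the head untouched
lemma writeStride2_cons (c : Int) (l : List Int) (i : Nat) (vals : List Int) :
    writeStride2 (c :: l) (i + 1) vals = c :: writeStride2 l i vals := by
  induction vals generalizing l i with
  | nil => rfl
  | cons v vs ih =>
    show writeStride2 ((c :: l).set (i + 1) v) (i + 3) vs = _
    simp only [List.set_cons_succ]
    have : i + 3 = (i + 2) + 1 := by omega
    rw [this, ih]
    rfl

-- B's two strided writes into a fresh buffer of length 2·|x| produce the interleaving of x and y.
lemma writeStride2_key (x : List Int) : ∀ (y : List Int), x.length = y.length →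
    writeStride2 (writeStride2 (List.replicate (2 * x.length) 0) 0 x) 1 y
    = (x.zip y).flatMap (fun p => [p.1, p.2]) := by
  induction x with
  | nil =>
    intro y hy
    obtain rfl : y = [] := by simpa using hy.symm
    simp [writeStride2]
  | cons a x' ih =>
    intro y hy
    match y, hy with
    | b :: y', hy =>
      have hrep : List.replicate (2 * (a :: x').length) (0 : Int)
          = 0 :: 0 :: List.replicate (2 * x'.length) 0 := by
        rw [List.length_cons, show 2 * (x'.length + 1) = (2 * x'.length + 1) + 1 by ring,
            List.replicate_succ, List.replicate_succ]
      rw [hrep]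
      have step1 : writeStride2 (0 :: 0 :: List.replicate (2 * x'.length) 0) 0 (a :: x')
          = a :: 0 :: writeStride2 (List.replicate (2 * x'.length) 0) 0 x' := by
        show writeStride2 (a :: 0 :: List.replicate (2 * x'.length) 0) ((0 + 1) + 1) x' = _
        rw [writeStride2_cons, writeStride2_cons]
      rw [step1]
      have step2 : ∀ W : List Int, writeStride2 (a :: 0 :: W) 1 (b :: y')
          = a :: b :: writeStride2 W 1 y' := by
        intro W
        show writeStride2 (a :: b :: W) ((1 + 1) + 1) y' = _
        rw [writeStride2_cons, writeStride2_cons]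
      rw [step2, ih y' (by simpa using hy)]
      rfl

-- ===== VERDICT (by name: the statement is the Claim_ definition above) =====
theorem lc_1470_spec : Claim_equal_lc_1470 := by
  intro nums n _ hpre
  unfold Spec_lc_1470 lc_1470 lc_1470_alt
  rcases hpre with ⟨hn, hlen⟩ | ⟨hn, hlen⟩
  · -- 0 ≤ n and 2n ≤ len: both sides are the interleaving of the two halves
    obtain ⟨m, rfl⟩ : ∃ m : Nat, n = (m : Int) := ⟨n.toNat, by omega⟩
    have h2m : 2 * m ≤ nums.length := by exact_mod_cast hlen
    have h1 : PySem.List.slice nums (some 0) (some (m : Int)) = nums.take m := by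
      rw [PySem.List.slice_toNat nums (by omega) (by positivity)]
      simp [Int.toNat_natCast]
    have h1' : PySem.List.slice nums none (some (m : Int)) = nums.take m := by
      rw [PySem.List.slice_to nums (by positivity)]
      simp [Int.toNat_natCast]
    have h2 : PySem.List.slice nums (some (m : Int)) none = nums.drop m := by
      rw [PySem.List.slice_from nums (by positivity)]; simp
    have h3 : PySem.List.slice nums (some (m : Int)) (some (2 * (m : Int)))
        = (nums.drop m).take m := by
      rw [PySem.List.slice_toNat nums (by positivity) (by positivity)]
      congr 1; omega
    rw [h1, h2, h1', h3]
    rw [interleave_key m (nums.take m) (nums.drop m) (by simp; omega) (by simp; omega)]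
    have hx : (nums.take m).length = m := by simp; omega
    have htoNat : (2 * (m : Int)).toNat = 2 * (nums.take m).length := by rw [hx]; omega
    rw [htoNat, writeStride2_key (nums.take m) ((nums.drop m).take m) (by simp; omega)]
    simp [List.take_take]
  · -- n < 0 with at most -n elements: both sides are []
    rw [PySem.List.pyRange_one_eq_nil (by omega), slice_mid_nil nums n (by omega),
        slice_to_nil nums n hlen]
    have : (2 * n).toNat = 0 := by omega
    simp [this, writeStride2]
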